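-- pv_equiv track=rewrite | github.com/rigdenlab/ample | ample/ensembler/__init__.py | _sort_ensembles_prioritise
-- ===== SOURCE A (Python) =====
-- import collections
--
-- def _sort_ensembles_prioritise(ensembles_zipped, keys_to_sort):
--     """Sort our ensembles based on the data in order of the keys provided"""
--     # Group the ensembles either by cluster ... or by truncation score ...
--     # ... otherwise throw them all in one pot
--     tmp_data = collections.defaultdict(list)
--     if "cluster_num" in keys_to_sort:
--         for ensemble in ensembles_zipped:
--             tmp_data[ensemble[1]['cluster_num']].append(ensemble)
--         iterator_keys = sorted(tmp_data.keys(), key=int)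
--
--     elif "truncation_score_key" in keys_to_sort:
--         for ensemble in ensembles_zipped:
--             tmp_data[ensemble[1]['truncation_score_key']].append(ensemble)
--         iterator_keys = sorted(tmp_data.keys())
--
--     else:
--         for ensemble in ensembles_zipped:
--             tmp_data["all"].append(ensemble)
--         iterator_keys = sorted(tmp_data.keys())
--
--     # Iterate through clusters and group based on truncation level
--     ensembles_zipped_ordered = []
--     for sbin in iterator_keys:
--         low, mid, high = [], [], []
--         for ensemble in _sort_ensembles_parameters(tmp_data[sbin], keys_to_sort):
--             if ensemble[1]['truncation_level'] > 50:
--                 high.append(ensemble)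
--             elif ensemble[1]['truncation_level'] < 20:
--                 low.append(ensemble)
--             else:
--                 mid.append(ensemble)
--         ensembles_zipped_ordered += mid + low + high
--
--     return ensembles_zipped_ordered
--
-- def _sort_ensembles_parameters(ensembles_zipped, keys_to_sort):
--     """Tiny wrapper function to sort ensembles data based on keys provided
--     """
--     def _extract(ens):
--         return [ens[1][crit] for crit in keys_to_sort]
--     return sorted(ensembles_zipped, key=_extract)
-- ===== SOURCE B (Python) =====
-- def _sort_ensembles_prioritise(ensembles_zipped, keys_to_sort):
--     """Sort our ensembles based on the data in order of the keys provided.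
--
--     One pass of three stable sorts (least-significant key first) instead of
--     grouping into a dict and bucketing each group by hand.
--     """
--     if "cluster_num" in keys_to_sort:
--         group_key = lambda ens: ens[1]["cluster_num"]
--     elif "truncation_score_key" in keys_to_sort:
--         group_key = lambda ens: ens[1]["truncation_score_key"]
--     else:
--         group_key = lambda ens: 0
--
--     def bucket(ens):
--         level = ens[1]["truncation_level"]
--         if 20 <= level <= 50:
--             return 0  # mid
--         if level < 20:
--             return 1  # low
--         return 2      # high
--
--     ordered = sorted(ensembles_zipped, key=lambda ens: [ens[1][crit] for crit in keys_to_sort])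
--     ordered = sorted(ordered, key=bucket)
--     return sorted(ordered, key=group_key)
-- ===== Notes on version B (the rewrite author's own statement) =====
-- stated objective: simpler
-- what changed: Replaces the defaultdict grouping, per-group parameter sort and manual low/mid/high bucketing with three chained stable sorts (parameters, then truncation-level bucket, then group key), relying on sort stability for the multi-key order.
import Mathlib
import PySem

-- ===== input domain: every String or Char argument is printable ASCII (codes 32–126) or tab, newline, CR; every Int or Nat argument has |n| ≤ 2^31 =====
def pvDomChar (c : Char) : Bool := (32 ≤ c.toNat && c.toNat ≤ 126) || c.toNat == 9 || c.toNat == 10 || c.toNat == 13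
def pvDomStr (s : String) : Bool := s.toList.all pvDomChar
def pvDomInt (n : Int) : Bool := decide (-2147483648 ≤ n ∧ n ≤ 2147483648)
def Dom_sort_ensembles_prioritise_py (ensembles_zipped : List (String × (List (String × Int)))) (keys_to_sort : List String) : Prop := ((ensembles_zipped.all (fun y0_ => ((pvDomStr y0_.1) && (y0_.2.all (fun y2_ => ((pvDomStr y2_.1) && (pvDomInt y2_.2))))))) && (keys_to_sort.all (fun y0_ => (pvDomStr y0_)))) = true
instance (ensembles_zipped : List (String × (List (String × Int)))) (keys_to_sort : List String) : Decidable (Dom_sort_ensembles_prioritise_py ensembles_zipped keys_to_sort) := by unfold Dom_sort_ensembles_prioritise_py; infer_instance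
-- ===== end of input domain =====

-- B replaces A's defaultdict grouping + per-group parameter sort + manual low/mid/high bucketing
-- by three chained stable sorts (parameters, then bucket, then group key); objective: simpler.

-- ===== PORT A =====
-- ens[1][k]: first-match lookup in the association list (Python dict). The default 0 is never
-- read on inputs admitted by Pre_ (Python raises KeyError exactly where the key is absent).
def pvLk (d : List (String × Int)) (k : String) : Int :=
  PySem.Dict.getD (PySem.Dict.mk d) k 0

def sort_ensembles_parameters_py (ensembles_zipped : List (String × (List (String × Int)))) (keys_to_sort : List String) : List (String × (List (String × Int))) :=
  PySem.List.sorted ensembles_zipped (fun ens => keys_to_sort.map (fun crit => pvLk ens.2 crit))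

def sort_ensembles_prioritise_py (ensembles_zipped : List (String × (List (String × Int)))) (keys_to_sort : List String) : List (String × (List (String × Int))) :=
  let groups : List (List (String × (List (String × Int)))) :=
    if keys_to_sort.contains "cluster_num" then
      let tmp : PySem.Dict Int (List (String × (List (String × Int)))) :=
        ensembles_zipped.foldl (fun d ens => d.modify (pvLk ens.2 "cluster_num") [] (fun l => l ++ [ens])) PySem.Dict.empty
      -- sorted(tmp_data.keys(), key=int): the keys are Python ints, on which int() is the identity
      (PySem.List.sorted (PySem.Dict.keys tmp) (fun k => k)).map (fun v => PySem.Dict.getD tmp v [])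
    else if keys_to_sort.contains "truncation_score_key" then
      let tmp : PySem.Dict Int (List (String × (List (String × Int)))) :=
        ensembles_zipped.foldl (fun d ens => d.modify (pvLk ens.2 "truncation_score_key") [] (fun l => l ++ [ens])) PySem.Dict.empty
      (PySem.List.sorted (PySem.Dict.keys tmp) (fun k => k)).map (fun v => PySem.Dict.getD tmp v [])
    else
      let tmp : PySem.Dict String (List (String × (List (String × Int)))) :=
        ensembles_zipped.foldl (fun d ens => d.modify "all" [] (fun l => l ++ [ens])) PySem.Dict.empty
      (PySem.List.sorted (PySem.Dict.keys tmp) (fun k => k)).map (fun v => PySem.Dict.getD tmp v [])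
  groups.foldl (fun acc grp =>
    let t := (sort_ensembles_parameters_py grp keys_to_sort).foldl
      (fun (lmh : List (String × (List (String × Int))) × List (String × (List (String × Int))) × List (String × (List (String × Int)))) ens =>
        if pvLk ens.2 "truncation_level" > 50 then (lmh.1, lmh.2.1, lmh.2.2 ++ [ens])
        else if pvLk ens.2 "truncation_level" < 20 then (lmh.1 ++ [ens], lmh.2.1, lmh.2.2)
        else (lmh.1, lmh.2.1 ++ [ens], lmh.2.2))
      ([], [], [])
    -- t = (low, mid, high); ensembles_zipped_ordered += mid + low + high
    acc ++ (t.2.1 ++ t.1 ++ t.2.2)) []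

-- ===== PORT B =====
def pvBucket (ens : String × (List (String × Int))) : Int :=
  let level := pvLk ens.2 "truncation_level"
  if 20 ≤ level ∧ level ≤ 50 then 0 else if level < 20 then 1 else 2

def sort_ensembles_prioritise_py_alt (ensembles_zipped : List (String × (List (String × Int)))) (keys_to_sort : List String) : List (String × (List (String × Int))) :=
  let group_key : (String × (List (String × Int))) → Int :=
    if keys_to_sort.contains "cluster_num" then fun ens => pvLk ens.2 "cluster_num"
    else if keys_to_sort.contains "truncation_score_key" then fun ens => pvLk ens.2 "truncation_score_key"
    else fun _ => 0
  let ordered := PySem.List.sorted ensembles_zipped (fun ens => keys_to_sort.map (fun crit => pvLk ens.2 crit))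
  let ordered2 := PySem.List.sorted ordered pvBucket
  PySem.List.sorted ordered2 group_key

-- ===== PRECONDITION & SPEC =====
-- Pre_ admits exactly the inputs on which Python A returns: every ensemble's dict must contain
-- 'truncation_level' and every key of keys_to_sort (otherwise Python raises KeyError).
def Pre_sort_ensembles_prioritise_py (ensembles_zipped : List (String × (List (String × Int)))) (keys_to_sort : List String) : Prop :=
  ∀ ens ∈ ensembles_zipped, ("truncation_level" ∈ ens.2.map Prod.fst) ∧ ∀ k ∈ keys_to_sort, k ∈ ens.2.map Prod.fst
instance (ensembles_zipped : List (String × (List (String × Int)))) (keys_to_sort : List String) : Decidable (Pre_sort_ensembles_prioritise_py ensembles_zipped keys_to_sort) := by unfold Pre_sort_ensembles_prioritise_py; infer_instance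

def pvWitness_sort_ensembles_prioritise_py : (List (String × (List (String × Int)))) × List String :=
  ([("e1", [("truncation_level", 30), ("cluster_num", 2)]), ("e2", [("truncation_level", 10), ("cluster_num", 1)])], ["cluster_num"])

def Spec_sort_ensembles_prioritise_py (ensembles_zipped : List (String × (List (String × Int)))) (keys_to_sort : List String) (out : List (String × (List (String × Int)))) : Prop := out = sort_ensembles_prioritise_py_alt ensembles_zipped keys_to_sort
instance (ensembles_zipped : List (String × (List (String × Int)))) (keys_to_sort : List String) (out : List (String × (List (String × Int)))) : Decidable (Spec_sort_ensembles_prioritise_py ensembles_zipped keys_to_sort out) := by unfold Spec_sort_ensembles_prioritise_py; infer_instance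

-- ===== CLAIM (what is proved, stated in full; the proofs are below) =====
def Claim_equal_sort_ensembles_prioritise_py : Prop := ∀ (ensembles_zipped : List (String × (List (String × Int)))) (keys_to_sort : List String), Dom_sort_ensembles_prioritise_py ensembles_zipped keys_to_sort → Pre_sort_ensembles_prioritise_py ensembles_zipped keys_to_sort → Spec_sort_ensembles_prioritise_py ensembles_zipped keys_to_sort (sort_ensembles_prioritise_py ensembles_zipped keys_to_sort)

-- ===== LEMMAS AND PROOFS =====

abbrev PvE := String × List (String × Int)

def pvParams (ks : List String) (e : PvE) : List Int := ks.map (fun crit => pvLk e.2 crit)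

-- the combined sort key (group value, bucket, parameter list) with its lexicographic strict order
def pvTrip (g : PvE → Int) (ks : List String) (e : PvE) : Int × Int × List Int :=
  (g e, pvBucket e, pvParams ks e)

def pvTLt (a b : Int × Int × List Int) : Prop :=
  a.1 < b.1 ∨ (a.1 = b.1 ∧ (a.2.1 < b.2.1 ∨ (a.2.1 = b.2.1 ∧ a.2.2 < b.2.2)))

def pvGroupFold {κ : Type} [BEq κ] (g : PvE → κ) (xs : List PvE) : PySem.Dict κ (List PvE) :=
  xs.foldl (fun d e => d.modify (g e) [] (fun l => l ++ [e])) PySem.Dict.empty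

def pvH (ks : List String) (grp : List PvE) : List PvE :=
  (PySem.List.sorted grp (pvParams ks)).filter (fun e => decide (pvBucket e = 0))
    ++ (PySem.List.sorted grp (pvParams ks)).filter (fun e => decide (pvBucket e = 1))
    ++ (PySem.List.sorted grp (pvParams ks)).filter (fun e => decide (pvBucket e = 2))

-- order facts for the core lexicographic order on List Int
lemma pvListLt_trans {a b c : List Int} (h1 : a < b) (h2 : b < c) : a < c := List.lt_trans h1 h2
lemma pvListLt_irrefl (a : List Int) : ¬ a < a := List.lt_irrefl a
lemma pvListLt_asymm {a b : List Int} (h : a < b) : ¬ b < a := List.lt_asymm h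
lemma pvListLt_tri {a b : List Int} (h1 : ¬ a < b) (h2 : ¬ b < a) : a = b := by
  have i : Std.Trichotomous (List.Lex (fun x1 x2 : Int => x1 < x2)) := inferInstance
  exact i.trichotomous a b (fun h => h1 ((List.lt_iff_lex_lt a b).2 h)) (fun h => h2 ((List.lt_iff_lex_lt b a).2 h))

lemma pvTLt_asymm {a b : Int × Int × List Int} (h1 : pvTLt a b) (h2 : pvTLt b a) : False := by
  unfold pvTLt at h1 h2
  rcases h1 with h1 | ⟨e1, h1 | ⟨e1', h1⟩⟩ <;> rcases h2 with h2 | ⟨e2, h2 | ⟨e2', h2⟩⟩ <;>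
    first
      | omega
      | exact pvListLt_asymm h1 h2

-- generic facts about the stable insertion sort (stated over the port's own LT instances)
lemma pvPairwise_of_forall {α : Type} {R : α → α → Prop} (h : ∀ a b, R a b) (l : List α) : l.Pairwise R := by
  induction l with
  | nil => exact List.Pairwise.nil
  | cons x xs ih => exact List.Pairwise.cons (fun b _ => h x b) ih

lemma pvInsertBy_pairwise {α κ : Type} [LT κ] [DecidableLT κ]
    (htrans : ∀ a b c : κ, a < b → b < c → a < c)
    (htri : ∀ a b : κ, ¬ a < b → ¬ b < a → a = b)
    (key : α → κ) (S : α → α → Prop) (x : α) :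
    ∀ acc : List α, acc.Pairwise (fun a b => key a < key b ∨ (key a = key b ∧ S a b)) →
    (∀ y ∈ acc, S y x) →
    (PySem.List.insertBy (fun a b => decide (key a < key b)) x acc).Pairwise
      (fun a b => key a < key b ∨ (key a = key b ∧ S a b)) := by
  intro acc
  induction acc with
  | nil => intro _ _; simp [PySem.List.insertBy]
  | cons y ys ih =>
    intro hp hS
    rw [List.pairwise_cons] at hp
    obtain ⟨hy, hys⟩ := hp
    by_cases hxy : key x < key y
    · have : PySem.List.insertBy (fun a b => decide (key a < key b)) x (y::ys) = x::y::ys := by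
        simp [PySem.List.insertBy, hxy]
      rw [this]
      refine List.Pairwise.cons ?_ (List.Pairwise.cons hy hys)
      intro b hb
      rcases List.mem_cons.1 hb with rfl | hb
      · exact Or.inl hxy
      · left
        rcases hy b hb with h | ⟨h, _⟩
        · exact htrans _ _ _ hxy h
        · exact h ▸ hxy
    · have : PySem.List.insertBy (fun a b => decide (key a < key b)) x (y::ys) = y :: PySem.List.insertBy (fun a b => decide (key a < key b)) x ys := by
        simp [PySem.List.insertBy, hxy]
      rw [this]
      refine List.Pairwise.cons ?_ (ih hys (fun z hz => hS z (List.mem_cons_of_mem _ hz)))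
      intro b hb
      rcases (PySem.List.mem_insertBy _ _ _ _).1 hb with heq | hb
      · rw [heq]
        by_cases hyx : key y < key x
        · exact Or.inl hyx
        · exact Or.inr ⟨htri _ _ hyx hxy, hS y List.mem_cons_self⟩
      · exact hy b hb

lemma pvSorted_pairwise_strong {α κ : Type} [LT κ] [DecidableLT κ]
    (htrans : ∀ a b c : κ, a < b → b < c → a < c)
    (htri : ∀ a b : κ, ¬ a < b → ¬ b < a → a = b)
    (key : α → κ) (S : α → α → Prop)
    (xs : List α) (h : xs.Pairwise S) :
    (PySem.List.sorted xs key).Pairwise (fun a b => key a < key b ∨ (key a = key b ∧ S a b)) := by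
  rw [PySem.List.sorted_eq_foldl_insertBy]
  suffices H : ∀ (xs : List α) (acc : List α),
      acc.Pairwise (fun a b => key a < key b ∨ (key a = key b ∧ S a b)) →
      (∀ y ∈ acc, ∀ x ∈ xs, S y x) → xs.Pairwise S →
      (xs.foldl (fun acc x => PySem.List.insertBy (fun a b => decide (key a < key b)) x acc) acc).Pairwise
        (fun a b => key a < key b ∨ (key a = key b ∧ S a b)) by
    exact H xs [] List.Pairwise.nil (by simp) h
  intro xs
  induction xs with
  | nil => intro acc hacc _ _; exact hacc
  | cons x xs ih =>
    intro acc hacc hcross hxs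
    rw [List.pairwise_cons] at hxs
    apply ih
    · exact pvInsertBy_pairwise htrans htri key S x acc hacc (fun y hy => hcross y hy x List.mem_cons_self)
    · intro y hy z hz
      rcases (PySem.List.mem_insertBy _ _ _ _).1 hy with rfl | hy
      · exact hxs.1 z hz
      · exact hcross y hy z (List.mem_cons_of_mem _ hz)
    · exact hxs.2

lemma pvInsertBy_pairwise_le {α κ : Type} [LT κ] [DecidableLT κ]
    (htrans : ∀ a b c : κ, a < b → b < c → a < c)
    (htri : ∀ a b : κ, ¬ a < b → ¬ b < a → a = b)
    (key : α → κ) (x : α)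
    (acc : List α) (h : acc.Pairwise (fun a b => key a < key b ∨ key a = key b)) :
    (PySem.List.insertBy (fun a b => decide (key a < key b)) x acc).Pairwise
      (fun a b => key a < key b ∨ key a = key b) := by
  have := pvInsertBy_pairwise htrans htri key (fun _ _ => True) x acc
    (h.imp (fun hab => hab.imp id (fun e => ⟨e, trivial⟩)))
    (fun _ _ => trivial)
  exact this.imp (fun hab => hab.imp id And.left)

lemma pvFilter_insertBy_not {α : Type} (bf : α → α → Bool) (q : α → Bool) (x : α) (hx : q x = false) :
    ∀ ys : List α, (PySem.List.insertBy bf x ys).filter q = ys.filter q := by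
  intro ys
  induction ys with
  | nil => simp [PySem.List.insertBy, hx]
  | cons y ys ih =>
    by_cases hb : bf x y
    · simp [PySem.List.insertBy, hb, hx]
    · simp only [PySem.List.insertBy, hb]
      simp only [Bool.false_eq_true, if_false, List.filter_cons, ih]

lemma pvFilter_insertBy_imp {α κ : Type} [LT κ] [DecidableLT κ]
    (htrans : ∀ a b c : κ, a < b → b < c → a < c)
    (hirr : ∀ a : κ, ¬ a < a)
    (key : α → κ) (q : α → Bool) (t : κ)
    (hq : ∀ a, q a = true → key a = t) (x : α) (hx : q x = true) :
    ∀ ys : List α, ys.Pairwise (fun a b => key a < key b ∨ key a = key b) →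
    (PySem.List.insertBy (fun a b => decide (key a < key b)) x ys).filter q = ys.filter q ++ [x] := by
  intro ys
  induction ys with
  | nil => intro _; simp [PySem.List.insertBy, hx]
  | cons y ys ih =>
    intro hp
    rw [List.pairwise_cons] at hp
    by_cases hxy : key x < key y
    · have hnil : (y :: ys).filter q = [] := by
        rw [List.filter_eq_nil_iff]
        intro a ha hqa
        have h1 : key a = t := hq a hqa
        have h2 : key x = t := hq x hx
        have : key x < key a := by
          rcases List.mem_cons.1 ha with rfl | ha
          · exact hxy
          · rcases hp.1 a ha with h | h
            · exact htrans _ _ _ hxy h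
            · exact h ▸ hxy
        rw [h1, h2] at this
        exact hirr t this
      have : PySem.List.insertBy (fun a b => decide (key a < key b)) x (y::ys) = x::y::ys := by
        simp [PySem.List.insertBy, hxy]
      rw [this, List.filter_cons, hx, hnil]
      simp
    · have : PySem.List.insertBy (fun a b => decide (key a < key b)) x (y::ys) = y :: PySem.List.insertBy (fun a b => decide (key a < key b)) x ys := by
        simp [PySem.List.insertBy, hxy]
      rw [this, List.filter_cons, List.filter_cons, ih hp.2]
      by_cases hqy : q y <;> simp [hqy]

lemma pvFilter_sorted {α κ : Type} [LT κ] [DecidableLT κ]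
    (htrans : ∀ a b c : κ, a < b → b < c → a < c)
    (htri : ∀ a b : κ, ¬ a < b → ¬ b < a → a = b)
    (hirr : ∀ a : κ, ¬ a < a)
    (key : α → κ) (q : α → Bool) (t : κ)
    (hq : ∀ a, q a = true → key a = t) (xs : List α) :
    (PySem.List.sorted xs key).filter q = xs.filter q := by
  rw [PySem.List.sorted_eq_foldl_insertBy]
  suffices H : ∀ (xs acc : List α), acc.Pairwise (fun a b => key a < key b ∨ key a = key b) →
      (xs.foldl (fun acc x => PySem.List.insertBy (fun a b => decide (key a < key b)) x acc) acc).filter q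
        = acc.filter q ++ xs.filter q by
    simpa using H xs [] List.Pairwise.nil
  intro xs
  induction xs with
  | nil => intro acc _; simp
  | cons x xs ih =>
    intro acc hacc
    rw [List.foldl_cons, ih _ (pvInsertBy_pairwise_le htrans htri key x acc hacc), List.filter_cons]
    by_cases hqx : q x
    · rw [pvFilter_insertBy_imp htrans hirr key q t hq x hqx acc hacc]
      simp [hqx]
    · rw [pvFilter_insertBy_not _ q x (by simpa using hqx)]
      simp [hqx]

-- uniqueness: a list ordered by a key and with prescribed key fibers is unique
lemma pvEq_of_pairwise_of_fiber {α κ : Type} [DecidableEq κ] (lt : κ → κ → Prop)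
    (hasym : ∀ a b : κ, lt a b → lt b a → False) (key : α → κ) :
    ∀ ys zs : List α,
    ys.Pairwise (fun a b => lt (key a) (key b) ∨ key a = key b) →
    zs.Pairwise (fun a b => lt (key a) (key b) ∨ key a = key b) →
    (∀ t : κ, ys.filter (fun a => decide (key a = t)) = zs.filter (fun a => decide (key a = t))) →
    ys = zs := by
  intro ys
  induction ys with
  | nil =>
    intro zs _ _ hf
    cases zs with
    | nil => rfl
    | cons z zs =>
      exfalso
      have := hf (key z)
      rw [List.filter_nil, List.filter_cons] at this
      simp at this
  | cons y ys ih =>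
    intro zs hy hz hf
    cases zs with
    | nil =>
      exfalso
      have := hf (key y)
      rw [List.filter_nil, List.filter_cons] at this
      simp at this
    | cons z zs =>
      rw [List.pairwise_cons] at hy hz
      have hyz : key y = key z := by
        have h1 : y ∈ (z :: zs).filter (fun a => decide (key a = key y)) := by
          rw [← hf (key y)]
          simp
        have h2 : z ∈ (y :: ys).filter (fun a => decide (key a = key z)) := by
          rw [hf (key z)]
          simp
        have hzy : lt (key z) (key y) ∨ key z = key y := by
          rcases List.mem_cons.1 (List.mem_of_mem_filter h1) with rfl | h
          · exact Or.inr rfl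
          · exact hz.1 y h
        have hyz' : lt (key y) (key z) ∨ key y = key z := by
          rcases List.mem_cons.1 (List.mem_of_mem_filter h2) with rfl | h
          · exact Or.inr rfl
          · exact hy.1 z h
        rcases hyz' with h | h
        · rcases hzy with h' | h'
          · exact absurd h' (fun h' => hasym _ _ h h')
          · exact h'.symm
        · exact h
      have heq : y = z := by
        have := hf (key y)
        rw [List.filter_cons, List.filter_cons] at this
        simp only [decide_eq_true_eq, hyz] at this
        simp at this
        exact this.1.symm ▸ this.1
      subst heq
      congr 1
      apply ih zs hy.2 hz.2
      intro t
      have := hf t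
      rw [List.filter_cons, List.filter_cons] at this
      by_cases hqt : key y = t
      · simp only [hqt, decide_true, if_true] at this ⊢
        simpa using this
      · simpa [hqt] using this

-- bucket facts
lemma pvBucket_cases (e : PvE) : pvBucket e = 0 ∨ pvBucket e = 1 ∨ pvBucket e = 2 := by
  simp only [pvBucket]; split_ifs <;> simp

lemma pvBucketSplit (l : List PvE) : ∀ a b c : List PvE,
    l.foldl (fun (lmh : List PvE × List PvE × List PvE) ens =>
        if pvLk ens.2 "truncation_level" > 50 then (lmh.1, lmh.2.1, lmh.2.2 ++ [ens])
        else if pvLk ens.2 "truncation_level" < 20 then (lmh.1 ++ [ens], lmh.2.1, lmh.2.2)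
        else (lmh.1, lmh.2.1 ++ [ens], lmh.2.2)) (a, b, c)
    = (a ++ l.filter (fun e => decide (pvBucket e = 1)),
       b ++ l.filter (fun e => decide (pvBucket e = 0)),
       c ++ l.filter (fun e => decide (pvBucket e = 2))) := by
  induction l with
  | nil => intro a b c; simp
  | cons e l ih =>
    intro a b c
    rw [List.foldl_cons]
    by_cases h1 : pvLk e.2 "truncation_level" > 50
    · have hb : pvBucket e = 2 := by simp only [pvBucket]; split_ifs <;> omega
      simp only [h1, if_pos, ih, List.filter_cons, hb]
      norm_num
    · by_cases h2 : pvLk e.2 "truncation_level" < 20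
      · have hb : pvBucket e = 1 := by simp only [pvBucket]; split_ifs <;> omega
        simp only [h1, h2, if_false, if_pos, ih, List.filter_cons, hb]
        norm_num
      · have hb : pvBucket e = 0 := by simp only [pvBucket]; split_ifs <;> omega
        simp only [h1, h2, if_false, ih, List.filter_cons, hb]
        norm_num

-- grouping-dict facts
lemma pvGroupFold_getD {κ : Type} [BEq κ] [LawfulBEq κ] [DecidableEq κ] (g : PvE → κ) (xs : List PvE) (v : κ) :
    (pvGroupFold g xs).getD v [] = xs.filter (fun e => decide (g e = v)) := by
  suffices H : ∀ (xs : List PvE) (d : PySem.Dict κ (List PvE)),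
      (xs.foldl (fun d e => d.modify (g e) [] (fun l => l ++ [e])) d).getD v []
        = d.getD v [] ++ xs.filter (fun e => decide (g e = v)) by
    simpa [PySem.Dict.getD_empty] using H xs PySem.Dict.empty
  intro xs
  induction xs with
  | nil => intro d; simp
  | cons e xs ih =>
    intro d
    rw [List.foldl_cons, ih, PySem.Dict.getD_modify, List.filter_cons]
    by_cases h : g e = v
    · simp [h]
    · simp [h, Ne.symm h]

lemma pvGroupFold_mem_keys {κ : Type} [BEq κ] [LawfulBEq κ] (g : PvE → κ) (xs : List PvE) (v : κ) :
    v ∈ (pvGroupFold g xs).keys ↔ ∃ e ∈ xs, g e = v := by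
  suffices H : ∀ (xs : List PvE) (d : PySem.Dict κ (List PvE)),
      (v ∈ (xs.foldl (fun d e => d.modify (g e) [] (fun l => l ++ [e])) d).keys ↔ v ∈ d.keys ∨ ∃ e ∈ xs, g e = v) by
    have := H xs PySem.Dict.empty
    simpa [PySem.Dict.keys_empty] using this
  intro xs
  induction xs with
  | nil => intro d; simp
  | cons e xs ih =>
    intro d
    rw [List.foldl_cons, ih, PySem.Dict.keys_modify]
    constructor
    · rintro (h | h)
      · rcases (PySem.Dict.mem_keys_insert _ _ _ _).1 h with rfl | h
        · exact Or.inr ⟨e, List.mem_cons_self, rfl⟩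
        · exact Or.inl h
      · obtain ⟨e', he', hg⟩ := h
        exact Or.inr ⟨e', List.mem_cons_of_mem _ he', hg⟩
    · rintro (h | ⟨e', he', hg⟩)
      · exact Or.inl ((PySem.Dict.mem_keys_insert _ _ _ _).2 (Or.inr h))
      · rcases List.mem_cons.1 he' with rfl | he'
        · exact Or.inl ((PySem.Dict.mem_keys_insert _ _ _ _).2 (Or.inl hg.symm))
        · exact Or.inr ⟨e', he', hg⟩

lemma pvGroupFold_nodup_keys {κ : Type} [BEq κ] [LawfulBEq κ] (g : PvE → κ) (xs : List PvE) :
    (pvGroupFold g xs).keys.Nodup := by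
  suffices H : ∀ (xs : List PvE) (d : PySem.Dict κ (List PvE)), d.keys.Nodup →
      (xs.foldl (fun d e => d.modify (g e) [] (fun l => l ++ [e])) d).keys.Nodup by
    exact H xs PySem.Dict.empty (by simp [PySem.Dict.keys_empty])
  intro xs
  induction xs with
  | nil => intro d h; exact h
  | cons e xs ih =>
    intro d h
    rw [List.foldl_cons]
    apply ih
    rw [PySem.Dict.keys_modify]
    exact PySem.Dict.nodup_keys_insert _ _ _ h

lemma pvGroupFold_const_keys {κ : Type} [BEq κ] [LawfulBEq κ] (c : κ) (xs : List PvE) :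
    (pvGroupFold (fun _ => c) xs).keys = if xs = [] then [] else [c] := by
  have H : ∀ (xs : List PvE) (d : PySem.Dict κ (List PvE)), d.keys = [c] →
      (xs.foldl (fun d e => d.modify c [] (fun l => l ++ [e])) d).keys = [c] := by
    intro xs
    induction xs with
    | nil => intro d h; exact h
    | cons e xs ih =>
      intro d h
      rw [List.foldl_cons]
      apply ih
      rw [PySem.Dict.keys_modify, PySem.Dict.keys_insert_of_contains _ _ ((PySem.Dict.contains_iff_mem_keys _ _).2 (by rw [h]; exact List.mem_cons_self))]
      exact h
  cases xs with
  | nil => simp [pvGroupFold, PySem.Dict.keys_empty]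
  | cons e xs =>
    rw [if_neg (by simp)]
    rw [pvGroupFold, List.foldl_cons]
    apply H
    rw [PySem.Dict.keys_modify, PySem.Dict.keys_insert_of_not_contains _ _ (PySem.Dict.contains_empty c), PySem.Dict.keys_empty]
    rfl

-- flatMap helpers
lemma pvFilter_flatMap {α β : Type} (q : β → Bool) (F : α → List β) (vs : List α) :
    (vs.flatMap F).filter q = vs.flatMap (fun v => (F v).filter q) := by
  induction vs with
  | nil => rfl
  | cons v vs ih => simp [List.flatMap_cons, List.filter_append, ih]

lemma pvFlatMap_single {α β : Type} (F : α → List β) (w : α) :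
    ∀ vs : List α, vs.Nodup → w ∈ vs → (∀ v ∈ vs, v ≠ w → F v = []) → vs.flatMap F = F w := by
  intro vs
  induction vs with
  | nil => intro _ h; exact absurd h (List.not_mem_nil)
  | cons v vs ih =>
    intro hnd hw hz
    rw [List.flatMap_cons]
    rcases List.mem_cons.1 hw with rfl | hw
    · have : vs.flatMap F = [] := by
        rw [List.flatMap_eq_nil_iff]
        intro x hx
        exact hz x (List.mem_cons_of_mem _ hx) (fun he => (List.nodup_cons.1 hnd).1 (he ▸ hx))
      rw [this, List.append_nil]
    · rw [hz v List.mem_cons_self (fun he => (List.nodup_cons.1 hnd).1 (he ▸ hw)), List.nil_append]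
      exact ih (List.nodup_cons.1 hnd).2 hw (fun x hx => hz x (List.mem_cons_of_mem _ hx))

lemma pvPairwise_flatMap {α β : Type} (lt : α → α → Prop) (R : β → β → Prop) (F : α → List β) :
    ∀ vs : List α, vs.Pairwise lt → (∀ v, (F v).Pairwise R) →
    (∀ v w, lt v w → ∀ a ∈ F v, ∀ b ∈ F w, R a b) → (vs.flatMap F).Pairwise R := by
  intro vs
  induction vs with
  | nil => intro _ _ _; exact List.Pairwise.nil
  | cons v vs ih =>
    intro hvs hin hcross
    rw [List.flatMap_cons, List.pairwise_append]
    rw [List.pairwise_cons] at hvs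
    refine ⟨hin v, ih hvs.2 hin hcross, ?_⟩
    intro a ha b hb
    obtain ⟨w, hw, hbw⟩ := List.mem_flatMap.1 hb
    exact hcross v w (hvs.1 w hw) a ha b hbw

-- per-group facts
lemma pvH_mem (ks : List String) (grp : List PvE) (e : PvE) (h : e ∈ pvH ks grp) : e ∈ grp := by
  unfold pvH at h
  rcases List.mem_append.1 h with h | h
  · rcases List.mem_append.1 h with h | h <;>
      exact (PySem.List.mem_sorted _ _ _ _).1 (List.mem_of_mem_filter h)
  · exact (PySem.List.mem_sorted _ _ _ _).1 (List.mem_of_mem_filter h)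

lemma pvH_pairwise (g : PvE → Int) (ks : List String) (grp : List PvE) (v : Int)
    (hv : ∀ e ∈ grp, g e = v) :
    (pvH ks grp).Pairwise (fun a b => pvTLt (pvTrip g ks a) (pvTrip g ks b) ∨ pvTrip g ks a = pvTrip g ks b) := by
  have hl : (PySem.List.sorted grp (pvParams ks)).Pairwise
      (fun a b => pvParams ks a < pvParams ks b ∨ (pvParams ks a = pvParams ks b ∧ True)) :=
    pvSorted_pairwise_strong (fun _ _ _ h1 h2 => pvListLt_trans h1 h2) (fun _ _ h1 h2 => pvListLt_tri h1 h2)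
      (pvParams ks) (fun _ _ => True) grp (pvPairwise_of_forall (fun _ _ => trivial) grp)
  have hg : ∀ e ∈ PySem.List.sorted grp (pvParams ks), g e = v := by
    intro e he; exact hv e ((PySem.List.mem_sorted _ _ _ _).1 he)
  have hfi : ∀ i : Int, ∀ a ∈ (PySem.List.sorted grp (pvParams ks)).filter (fun e => decide (pvBucket e = i)),
      pvBucket a = i ∧ g a = v := by
    intro i a ha
    have := List.mem_filter.1 ha
    exact ⟨by simpa using this.2, hg a this.1⟩
  have hwithin : ∀ i : Int, ((PySem.List.sorted grp (pvParams ks)).filter (fun e => decide (pvBucket e = i))).Pairwise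
      (fun a b => pvTLt (pvTrip g ks a) (pvTrip g ks b) ∨ pvTrip g ks a = pvTrip g ks b) := by
    intro i
    refine (hl.filter _).imp_of_mem ?_
    intro a b ha hb hab
    have hga := hfi i a ha
    have hgb := hfi i b hb
    rcases hab with hab | ⟨hab, _⟩
    · exact Or.inl (Or.inr ⟨hga.2.trans hgb.2.symm, Or.inr ⟨hga.1.trans hgb.1.symm, hab⟩⟩)
    · refine Or.inr ?_
      unfold pvTrip
      rw [hga.2, hgb.2, hga.1, hgb.1, hab]
  have hcross : ∀ i j : Int, i < j →
      ∀ a ∈ (PySem.List.sorted grp (pvParams ks)).filter (fun e => decide (pvBucket e = i)),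
      ∀ b ∈ (PySem.List.sorted grp (pvParams ks)).filter (fun e => decide (pvBucket e = j)),
      pvTLt (pvTrip g ks a) (pvTrip g ks b) ∨ pvTrip g ks a = pvTrip g ks b := by
    intro i j hij a ha b hb
    refine Or.inl (Or.inr ⟨(hfi i a ha).2.trans (hfi j b hb).2.symm, Or.inl ?_⟩)
    show pvBucket a < pvBucket b
    rw [(hfi i a ha).1, (hfi j b hb).1]; exact hij
  unfold pvH
  rw [List.append_assoc, List.pairwise_append]
  refine ⟨hwithin 0, ?_, ?_⟩
  · rw [List.pairwise_append]
    exact ⟨hwithin 1, hwithin 2, hcross 1 2 (by norm_num)⟩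
  · intro a ha b hb
    rcases List.mem_append.1 hb with hb | hb
    · exact hcross 0 1 (by norm_num) a ha b hb
    · exact hcross 0 2 (by norm_num) a ha b hb

lemma pvTrip_eq_iff (g : PvE → Int) (ks : List String) (a : PvE) (t : Int × Int × List Int) :
    pvTrip g ks a = t ↔ g a = t.1 ∧ pvBucket a = t.2.1 ∧ pvParams ks a = t.2.2 := by
  simp [pvTrip, Prod.ext_iff]

lemma pvH_fiber (g : PvE → Int) (ks : List String) (grp : List PvE)
    (t : Int × Int × List Int) :
    (pvH ks grp).filter (fun a => decide (pvTrip g ks a = t))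
      = grp.filter (fun a => decide (pvTrip g ks a = t)) := by
  have hql : (PySem.List.sorted grp (pvParams ks)).filter (fun a => decide (pvTrip g ks a = t))
      = grp.filter (fun a => decide (pvTrip g ks a = t)) := by
    apply pvFilter_sorted (fun _ _ _ h1 h2 => pvListLt_trans h1 h2) (fun _ _ h1 h2 => pvListLt_tri h1 h2)
      pvListLt_irrefl (pvParams ks) _ t.2.2
    intro a ha
    exact ((pvTrip_eq_iff g ks a t).1 (by simpa using ha)).2.2
  have hfi : ∀ i : Int,
      ((PySem.List.sorted grp (pvParams ks)).filter (fun e => decide (pvBucket e = i))).filter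
          (fun a => decide (pvTrip g ks a = t))
        = if t.2.1 = i then grp.filter (fun a => decide (pvTrip g ks a = t)) else [] := by
    intro i
    rw [List.filter_filter]
    split_ifs with hi
    · rw [← hql]
      apply List.filter_congr
      intro a _
      by_cases hq : pvTrip g ks a = t
      · have : pvBucket a = i := hi ▸ ((pvTrip_eq_iff g ks a t).1 hq).2.1
        simp [hq, this]
      · simp [hq]
    · rw [List.filter_eq_nil_iff]
      intro a _ hqa
      simp only [Bool.and_eq_true, decide_eq_true_eq] at hqa
      exact hi ((((pvTrip_eq_iff g ks a t).1 hqa.1).2.1 ▸ hqa.2).symm).symm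
  unfold pvH
  rw [List.filter_append, List.filter_append, hfi 0, hfi 1, hfi 2]
  by_cases h0 : t.2.1 = 0
  · rw [if_pos h0, if_neg (by omega), if_neg (by omega)]
    simp
  · by_cases h1 : t.2.1 = 1
    · rw [if_neg h0, if_pos h1, if_neg (by omega)]
      simp
    · by_cases h2 : t.2.1 = 2
      · rw [if_neg h0, if_neg h1, if_pos h2]
        simp
      · rw [if_neg h0, if_neg h1, if_neg h2]
        simp only [List.append_nil]
        symm
        rw [List.filter_eq_nil_iff]
        intro a _ hqa
        have hb := ((pvTrip_eq_iff g ks a t).1 (by simpa using hqa)).2.1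
        rcases pvBucket_cases a with h | h | h <;> rw [h] at hb
        · exact h0 hb.symm
        · exact h1 hb.symm
        · exact h2 hb.symm

lemma pvH_fiber_ne (g : PvE → Int) (ks : List String) (grp : List PvE) (v : Int)
    (t : Int × Int × List Int) (hv : ∀ e ∈ grp, g e = v) (hvt : v ≠ t.1) :
    (pvH ks grp).filter (fun a => decide (pvTrip g ks a = t)) = [] := by
  rw [List.filter_eq_nil_iff]
  intro a ha hqa
  have := ((pvTrip_eq_iff g ks a t).1 (by simpa using hqa)).1
  exact hvt ((hv a (pvH_mem ks grp a ha)).symm.trans this)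

-- the master branch lemma: A's pipeline for group key g equals B's three stable sorts
lemma pvA_eq (g : PvE → Int) (ks : List String) (xs : List PvE) :
    ((PySem.List.sorted (pvGroupFold g xs).keys (fun k => k)).map
        (fun v => (pvGroupFold g xs).getD v [])).foldl (fun acc grp => acc ++ pvH ks grp) []
    = PySem.List.sorted (PySem.List.sorted (PySem.List.sorted xs (pvParams ks)) pvBucket) g := by
  have hIntTrans : ∀ a b c : Int, a < b → b < c → a < c := fun _ _ _ h1 h2 => h1.trans h2
  have hIntTri : ∀ a b : Int, ¬ a < b → ¬ b < a → a = b := fun _ _ h1 h2 => by omega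
  have hIntIrr : ∀ a : Int, ¬ a < a := fun _ => by omega
  have hnodup : (PySem.List.sorted (pvGroupFold g xs).keys (fun k : Int => k)).Nodup :=
    (PySem.List.sorted_perm _ _ _).nodup_iff.2 (pvGroupFold_nodup_keys g xs)
  have hvs_lt : (PySem.List.sorted (pvGroupFold g xs).keys (fun k : Int => k)).Pairwise (· < ·) := by
    have h := pvSorted_pairwise_strong hIntTrans hIntTri (fun k : Int => k) (fun a b => a ≠ b)
      (pvGroupFold g xs).keys (pvGroupFold_nodup_keys g xs)
    refine h.imp ?_
    rintro a b (h | ⟨h, hne⟩)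
    · exact h
    · exact absurd h hne
  have hmem_vs : ∀ v : Int, v ∈ PySem.List.sorted (pvGroupFold g xs).keys (fun k : Int => k) ↔ ∃ e ∈ xs, g e = v := by
    intro v
    rw [PySem.List.mem_sorted]
    exact pvGroupFold_mem_keys g xs v
  rw [PySem.List.foldl_append_eq_flatMap, List.nil_append, List.flatMap_map]
  have hgetD : (fun v => pvH ks ((pvGroupFold g xs).getD v []))
      = fun v => pvH ks (xs.filter (fun e => decide (g e = v))) := by
    funext v
    rw [pvGroupFold_getD]
  rw [hgetD]
  apply pvEq_of_pairwise_of_fiber pvTLt (fun _ _ h1 h2 => pvTLt_asymm h1 h2) (pvTrip g ks)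
  · -- the flatMap side is ordered by the combined key
    apply pvPairwise_flatMap (· < ·) _ _ _ hvs_lt
    · intro v
      exact pvH_pairwise g ks _ v (fun e he => by simpa using (List.mem_filter.1 he).2)
    · intro v w hvw a ha b hb
      have hga : g a = v := by
        simpa using (List.mem_filter.1 (pvH_mem ks _ a ha)).2
      have hgb : g b = w := by
        simpa using (List.mem_filter.1 (pvH_mem ks _ b hb)).2
      exact Or.inl (Or.inl (by rw [pvTrip, pvTrip]; show g a < g b; rw [hga, hgb]; exact hvw))
  · -- the triple-sort side is ordered by the combined key
    have h1 := pvSorted_pairwise_strong (fun _ _ _ h1 h2 => pvListLt_trans h1 h2)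
      (fun _ _ h1 h2 => pvListLt_tri h1 h2) (pvParams ks) (fun _ _ => True) xs
      (pvPairwise_of_forall (fun _ _ => trivial) xs)
    have h2 := pvSorted_pairwise_strong hIntTrans hIntTri pvBucket _ _ h1
    have h3 := pvSorted_pairwise_strong hIntTrans hIntTri g _ _ h2
    refine h3.imp ?_
    rintro a b (h | ⟨hg1, h | ⟨hb1, h | ⟨hp1, _⟩⟩⟩)
    · exact Or.inl (Or.inl h)
    · exact Or.inl (Or.inr ⟨hg1, Or.inl h⟩)
    · exact Or.inl (Or.inr ⟨hg1, Or.inr ⟨hb1, h⟩⟩)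
    · refine Or.inr ?_
      unfold pvTrip
      rw [hg1, hb1, hp1]
  · -- the fibers of the combined key agree
    intro t
    rw [pvFilter_sorted hIntTrans hIntTri hIntIrr g _ t.1
          (fun a ha => ((pvTrip_eq_iff g ks a t).1 (by simpa using ha)).1),
        pvFilter_sorted hIntTrans hIntTri hIntIrr pvBucket _ t.2.1
          (fun a ha => ((pvTrip_eq_iff g ks a t).1 (by simpa using ha)).2.1),
        pvFilter_sorted (fun _ _ _ h1 h2 => pvListLt_trans h1 h2) (fun _ _ h1 h2 => pvListLt_tri h1 h2)
          pvListLt_irrefl (pvParams ks) _ t.2.2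
          (fun a ha => ((pvTrip_eq_iff g ks a t).1 (by simpa using ha)).2.2)]
    rw [pvFilter_flatMap]
    by_cases hin : t.1 ∈ PySem.List.sorted (pvGroupFold g xs).keys (fun k : Int => k)
    · rw [pvFlatMap_single _ t.1 _ hnodup hin
        (fun v _ hne => pvH_fiber_ne g ks _ v t (fun e he => by simpa using (List.mem_filter.1 he).2) hne)]
      rw [pvH_fiber g ks _ t]
      rw [List.filter_filter]
      apply List.filter_congr
      intro a _
      by_cases hq : pvTrip g ks a = t
      · have : g a = t.1 := ((pvTrip_eq_iff g ks a t).1 hq).1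
        simp [hq, this]
      · simp [hq]
    · have hall : ∀ v ∈ PySem.List.sorted (pvGroupFold g xs).keys (fun k : Int => k),
          (pvH ks (xs.filter (fun e => decide (g e = v)))).filter (fun a => decide (pvTrip g ks a = t)) = [] := by
        intro v hv
        apply pvH_fiber_ne g ks _ v t (fun e he => by simpa using (List.mem_filter.1 he).2)
        intro he
        exact hin (he ▸ hv)
      rw [List.flatMap_eq_nil_iff.2 hall]
      symm
      rw [List.filter_eq_nil_iff]
      intro a ha hqa
      have := ((pvTrip_eq_iff g ks a t).1 (by simpa using hqa)).1
      exact hin ((hmem_vs t.1).2 ⟨a, ha, this⟩)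

-- the 'all' branch: the String-keyed constant dict gives the same group list as the
-- Int-keyed constant dict ([] or [xs]), so the master lemma applies with g = const 0
lemma pvGroups_const {κ : Type} [BEq κ] [LawfulBEq κ] [DecidableEq κ] [LT κ] [DecidableLT κ] (c : κ) (xs : List PvE) :
    (PySem.List.sorted (pvGroupFold (fun _ => c) xs).keys (fun k => k)).map
        (fun v => (pvGroupFold (fun _ => c) xs).getD v [])
    = if xs = [] then [] else [xs] := by
  rw [pvGroupFold_const_keys]
  cases xs with
  | nil =>
    simp [PySem.List.sorted_eq_foldl_insertBy]
  | cons e xs =>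
    rw [if_neg (by simp), if_neg (by simp)]
    rw [PySem.List.sorted_eq_foldl_insertBy]
    simp only [List.foldl_cons, List.foldl_nil, PySem.List.insertBy, List.map_cons, List.map_nil]
    rw [pvGroupFold_getD]
    simp

lemma pvA3_eq (ks : List String) (xs : List PvE) :
    ((PySem.List.sorted (pvGroupFold (fun _ => "all") xs).keys (fun k => k)).map
        (fun v => (pvGroupFold (fun _ => "all") xs).getD v [])).foldl (fun acc grp => acc ++ pvH ks grp) []
    = PySem.List.sorted (PySem.List.sorted (PySem.List.sorted xs (pvParams ks)) pvBucket) (fun _ => (0 : Int)) := by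
  rw [pvGroups_const, ← pvGroups_const (0 : Int) xs]
  exact pvA_eq (fun _ => 0) ks xs

-- rewrite A's inner low/mid/high loop into pvH
lemma pvBody_eq (ks : List String) (groups : List (List PvE)) :
    groups.foldl (fun acc grp =>
      let t := (sort_ensembles_parameters_py grp ks).foldl
        (fun (lmh : List PvE × List PvE × List PvE) ens =>
          if pvLk ens.2 "truncation_level" > 50 then (lmh.1, lmh.2.1, lmh.2.2 ++ [ens])
          else if pvLk ens.2 "truncation_level" < 20 then (lmh.1 ++ [ens], lmh.2.1, lmh.2.2)
          else (lmh.1, lmh.2.1 ++ [ens], lmh.2.2))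
        ([], [], [])
      acc ++ (t.2.1 ++ t.1 ++ t.2.2)) []
    = groups.foldl (fun acc grp => acc ++ pvH ks grp) [] := by
  apply PySem.List.foldl_congr_mem
  intro acc grp _
  show acc ++ _ = acc ++ pvH ks grp
  rw [pvBucketSplit]
  simp only [List.nil_append]
  rfl

-- ===== VERDICT (by name: the statement is the Claim_ definition above) =====
theorem sort_ensembles_prioritise_py_spec : Claim_equal_sort_ensembles_prioritise_py := by
  intro xs ks _ _
  unfold Spec_sort_ensembles_prioritise_py
  unfold sort_ensembles_prioritise_py sort_ensembles_prioritise_py_alt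
  by_cases h1 : ks.contains "cluster_num"
  · simp only [h1, if_true]
    rw [pvBody_eq]
    exact pvA_eq (fun ens => pvLk ens.2 "cluster_num") ks xs
  · simp only [h1, Bool.false_eq_true, if_false]
    by_cases h2 : ks.contains "truncation_score_key"
    · simp only [h2, if_true]
      rw [pvBody_eq]
      exact pvA_eq (fun ens => pvLk ens.2 "truncation_score_key") ks xs
    · simp only [h2, Bool.false_eq_true, if_false]
      rw [pvBody_eq]
      exact pvA3_eq ks xs
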